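-- pv_equiv track=rewrite | github.com/AnishMore224/ITER_ASSIGNMENT | Python/Major_Assignment_2/Q3.py | high_alert_cities_information
-- ===== SOURCE A (Python) =====
-- def high_alert_cities_information(high_alert_cities, data):
--     high_alert_cities_info = {}
--     for city in high_alert_cities:
--         for item in data:
--             if item[0] == city:
--                 high_alert_cities_info[city] = item
--                 break
--     return high_alert_cities_info,sum([item[1] for item in high_alert_cities_info.values()]),sum([item[2] for item in high_alert_cities_info.values()])
-- ===== SOURCE B (Python) =====
-- def high_alert_cities_information(high_alert_cities, data):
--     # index each city to its first item in data, then one fused pass over high_alert_cities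
--     index = {}
--     for item in data:
--         if item[0] not in index:
--             index[item[0]] = item
--     info = {}
--     total1 = 0
--     total2 = 0
--     for city in high_alert_cities:
--         item = index.get(city)
--         if item is not None and city not in info:
--             info[city] = item
--             total1 += item[1]
--             total2 += item[2]
--     return info, total1, total2
-- ===== Notes on version B (the rewrite author's own statement) =====
-- stated objective: faster
-- what changed: Replaced the nested rescan of data per city with a one-pass first-occurrence index dict, and fused the two post-hoc sum comprehensions over the result dict's values into accumulators updated during the single pass over high_alert_cities.
import Mathlib
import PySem

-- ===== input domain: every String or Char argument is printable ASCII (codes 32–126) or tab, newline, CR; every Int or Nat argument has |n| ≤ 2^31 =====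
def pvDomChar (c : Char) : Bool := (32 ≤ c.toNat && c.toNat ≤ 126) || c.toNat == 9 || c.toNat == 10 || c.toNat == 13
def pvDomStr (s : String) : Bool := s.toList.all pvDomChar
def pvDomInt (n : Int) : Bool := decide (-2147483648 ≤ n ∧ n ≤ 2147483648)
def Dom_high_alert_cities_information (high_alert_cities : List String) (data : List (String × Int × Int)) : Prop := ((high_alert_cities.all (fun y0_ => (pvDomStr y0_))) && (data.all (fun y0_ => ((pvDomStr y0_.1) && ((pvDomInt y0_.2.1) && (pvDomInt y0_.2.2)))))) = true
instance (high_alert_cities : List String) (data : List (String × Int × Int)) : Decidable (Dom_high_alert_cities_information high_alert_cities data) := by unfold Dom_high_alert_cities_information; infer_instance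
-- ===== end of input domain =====

-- B replaces A's nested rescans of `data` per city with a one-pass first-occurrence index and
-- fuses the two sum comprehensions into accumulators maintained during the single city pass (objective: faster).

-- ===== PORT A =====
-- inner 'for item in data: if item[0] == city: …; break' of A
def pvFindFirst (city : String) : List (String × Int × Int) → Option (String × Int × Int)
  | [] => none
  | item :: rest => if item.1 == city then some item else pvFindFirst city rest

def high_alert_cities_information (high_alert_cities : List String) (data : List (String × Int × Int)) : (List (String × String × Int × Int)) × Int × Int :=
  let info := high_alert_cities.foldl (fun d city =>
      match pvFindFirst city data with
      | some item => d.insert city item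
      | none => d) (PySem.Dict.empty : PySem.Dict String (String × Int × Int))
  (info.items,
   (info.values.map (fun item => item.2.1)).sum,
   (info.values.map (fun item => item.2.2)).sum)

-- ===== PORT B =====
def high_alert_cities_information_alt (high_alert_cities : List String) (data : List (String × Int × Int)) : (List (String × String × Int × Int)) × Int × Int :=
  let index := data.foldl (fun d item => if d.contains item.1 then d else d.insert item.1 item)
      (PySem.Dict.empty : PySem.Dict String (String × Int × Int))
  let r := high_alert_cities.foldl (fun (s : PySem.Dict String (String × Int × Int) × Int × Int) city =>
      match index.get? city with
      | some item => if s.1.contains city then s else (s.1.insert city item, s.2.1 + item.2.1, s.2.2 + item.2.2)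
      | none => s) (PySem.Dict.empty, 0, 0)
  (r.1.items, r.2.1, r.2.2)

-- ===== PRECONDITION & SPEC =====
def Spec_high_alert_cities_information (high_alert_cities : List String) (data : List (String × Int × Int)) (out : (List (String × String × Int × Int)) × Int × Int) : Prop := out = high_alert_cities_information_alt high_alert_cities data
instance (high_alert_cities : List String) (data : List (String × Int × Int)) (out : (List (String × String × Int × Int)) × Int × Int) : Decidable (Spec_high_alert_cities_information high_alert_cities data out) := by unfold Spec_high_alert_cities_information; infer_instance

-- ===== CLAIM (what is proved, stated in full; the proofs are below) =====
def Claim_equal_high_alert_cities_information : Prop := ∀ (high_alert_cities : List String) (data : List (String × Int × Int)), Dom_high_alert_cities_information high_alert_cities data → Spec_high_alert_cities_information high_alert_cities data (high_alert_cities_information high_alert_cities data)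

-- ===== LEMMAS AND PROOFS =====

-- B's index answers exactly A's inner scan
theorem pv_index_get? (data : List (String × Int × Int)) (d : PySem.Dict String (String × Int × Int)) (c : String) :
    (data.foldl (fun d item => if d.contains item.1 then d else d.insert item.1 item) d).get? c
      = (d.get? c).or (pvFindFirst c data) := by
  induction data generalizing d with
  | nil => simp [pvFindFirst]
  | cons item rest ih =>
    simp only [List.foldl_cons]
    by_cases hc : d.contains item.1
    · simp only [hc, if_true, ih, pvFindFirst]
      by_cases he : item.1 = c
      · subst he
        have hs : (d.get? item.1).isSome := by
          rw [← PySem.Dict.contains_eq_isSome_get?]; exact hc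
        cases hg : d.get? item.1 with
        | none => rw [hg] at hs; simp at hs
        | some v => simp
      · simp [he, beq_iff_eq]
    · have hcf : d.contains item.1 = false := by simpa using hc
      simp only [hcf, Bool.false_eq_true, if_false, ih]
      have hdn : d.get? item.1 = none := by
        have hiso := PySem.Dict.contains_eq_isSome_get? d item.1
        cases hg : d.get? item.1 with
        | none => rfl
        | some v => rw [hg, hcf] at hiso; simp at hiso
      by_cases he : c = item.1
      · subst he
        simp [hdn, pvFindFirst]
      · rw [PySem.Dict.get?_insert]
        simp only [he, if_false, pvFindFirst]
        have hne : (item.1 == c) = false := by simp; exact fun h => he h.symm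
        simp [hne]

-- overwriting a key with the value it already holds is a no-op
theorem pv_insert_same (d : PySem.Dict String (String × Int × Int)) (k : String) (v : String × Int × Int)
    (hnd : d.keys.Nodup) (hg : d.get? k = some v) : d.insert k v = d := by
  have hc : d.contains k = true := by
    rw [PySem.Dict.contains_eq_isSome_get?, hg]; rfl
  apply PySem.Dict.ext
  rw [PySem.Dict.items_insert_of_contains d v hc]
  have hmap : ∀ p ∈ d.items, (if p.1 == k then (k, v) else p) = p := by
    intro p hp
    obtain ⟨pk, pv⟩ := p
    by_cases he : pk = k
    · subst he
      have hgp : d.get? pk = some pv := PySem.Dict.get?_of_mem_items d hp hnd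
      rw [hgp] at hg
      cases hg
      simp
    · simp [he]
  rw [List.map_congr_left hmap]
  simp

def pvV1 (d : PySem.Dict String (String × Int × Int)) : Int := (d.values.map (fun item => item.2.1)).sum
def pvV2 (d : PySem.Dict String (String × Int × Int)) : Int := (d.values.map (fun item => item.2.2)).sum

theorem pvV1_insert_fresh (d : PySem.Dict String (String × Int × Int)) (k : String) (v : String × Int × Int)
    (hc : d.contains k = false) : pvV1 (d.insert k v) = pvV1 d + v.2.1 := by
  simp [pvV1, PySem.Dict.values, PySem.Dict.items_insert_of_not_contains d v hc]

theorem pvV2_insert_fresh (d : PySem.Dict String (String × Int × Int)) (k : String) (v : String × Int × Int)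
    (hc : d.contains k = false) : pvV2 (d.insert k v) = pvV2 d + v.2.2 := by
  simp [pvV2, PySem.Dict.values, PySem.Dict.items_insert_of_not_contains d v hc]

-- the fused loop of B tracks A's dict plus the running value sums
theorem pv_main (data : List (String × Int × Int)) (hac : List String)
    (d : PySem.Dict String (String × Int × Int)) (t1 t2 : Int)
    (hnd : d.keys.Nodup) (hinv : ∀ c v, d.get? c = some v → pvFindFirst c data = some v) :
    hac.foldl (fun (s : PySem.Dict String (String × Int × Int) × Int × Int) city =>
      match pvFindFirst city data with
      | some item => if s.1.contains city then s else (s.1.insert city item, s.2.1 + item.2.1, s.2.2 + item.2.2)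
      | none => s) (d, t1, t2)
    = (hac.foldl (fun d city =>
        match pvFindFirst city data with
        | some item => d.insert city item
        | none => d) d,
       t1 + (pvV1 (hac.foldl (fun d city => match pvFindFirst city data with | some item => d.insert city item | none => d) d) - pvV1 d),
       t2 + (pvV2 (hac.foldl (fun d city => match pvFindFirst city data with | some item => d.insert city item | none => d) d) - pvV2 d)) := by
  induction hac generalizing d t1 t2 with
  | nil => simp
  | cons city rest ih =>
    simp only [List.foldl_cons]
    cases hf : pvFindFirst city data with
    | none => simpa using ih d t1 t2 hnd hinv
    | some item =>
      simp only
      by_cases hc : d.contains city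
      · -- city already present, and it must hold exactly `item`: overwrite is a no-op
        have hs : (d.get? city).isSome := by rw [← PySem.Dict.contains_eq_isSome_get?]; exact hc
        cases hg : d.get? city with
        | none => rw [hg] at hs; simp at hs
        | some v =>
          have hv : v = item := by
            have := hinv city v hg; rw [hf] at this; cases this; rfl
          subst hv
          rw [pv_insert_same d city v hnd hg]
          simp only [hc, reduceIte]
          exact ih d t1 t2 hnd hinv
      · rw [Bool.not_eq_true] at hc
        rw [hc]
        simp only [Bool.false_eq_true, if_false]
        have hnd' : (d.insert city item).keys.Nodup := PySem.Dict.nodup_keys_insert d city item hnd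
        have hinv' : ∀ c v, (d.insert city item).get? c = some v → pvFindFirst c data = some v := by
          intro c v hg
          rw [PySem.Dict.get?_insert] at hg
          by_cases he : c = city
          · rw [he]; rw [if_pos he] at hg; cases hg; exact hf
          · rw [if_neg he] at hg; exact hinv c v hg
        rw [ih (d.insert city item) _ _ hnd' hinv']
        rw [pvV1_insert_fresh d city item hc, pvV2_insert_fresh d city item hc]
        refine Prod.ext rfl (Prod.ext ?_ ?_) <;> simp <;> ring

-- ===== VERDICT (by name: the statement is the Claim_ definition above) =====
theorem high_alert_cities_information_spec : Claim_equal_high_alert_cities_information := by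
  intro hac data _
  unfold Spec_high_alert_cities_information
  unfold high_alert_cities_information high_alert_cities_information_alt
  simp only
  have hidx : ∀ c, ((data.foldl (fun d item => if d.contains item.1 then d else d.insert item.1 item)
      (PySem.Dict.empty : PySem.Dict String (String × Int × Int))).get? c) = pvFindFirst c data := by
    intro c
    rw [pv_index_get?]
    simp [PySem.Dict.get?_empty]
  have hfun : (fun (s : PySem.Dict String (String × Int × Int) × Int × Int) city =>
      match (data.foldl (fun d item => if d.contains item.1 then d else d.insert item.1 item)
        (PySem.Dict.empty : PySem.Dict String (String × Int × Int))).get? city with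
      | some item => if s.1.contains city then s else (s.1.insert city item, s.2.1 + item.2.1, s.2.2 + item.2.2)
      | none => s)
    = (fun (s : PySem.Dict String (String × Int × Int) × Int × Int) city =>
      match pvFindFirst city data with
      | some item => if s.1.contains city then s else (s.1.insert city item, s.2.1 + item.2.1, s.2.2 + item.2.2)
      | none => s) := by
    funext s city; rw [hidx]
  rw [hfun, pv_main data hac PySem.Dict.empty 0 0 PySem.Dict.nodup_keys_empty
      (by intro c v h; rw [PySem.Dict.get?_empty] at h; cases h)]
  simp [pvV1, pvV2, PySem.Dict.empty, PySem.Dict.values]
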